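-- pv_equiv track=rewrite | github.com/Development-study/-Python-codingTest | codingTest/level2/code13.py | solution
-- ===== SOURCE A (Python) =====
-- def solution(s):
--     s_list = s.split(" ")
--
--     d = []
--     for string in s_list:
--         if string:
--             d.append(string[0].upper() + string[1:].lower())
--         else:
--             d.append(string)
--
--
--     return ' '.join(d)
-- ===== SOURCE B (Python) =====
-- def solution(s):
--     out = []
--     at_word_start = True
--     for ch in s:
--         if ch == ' ':
--             out.append(ch)
--             at_word_start = True
--         else:
--             out.append(ch.upper() if at_word_start else ch.lower())
--             at_word_start = False
--     return ''.join(out)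
-- ===== Notes on version B (the rewrite author's own statement) =====
-- stated objective: alternative
-- what changed: Replaces the split-into-words, capitalize-each-word, rejoin pipeline with a single character scan that keeps an at-word-start flag and builds no intermediate word list.
import Mathlib
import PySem

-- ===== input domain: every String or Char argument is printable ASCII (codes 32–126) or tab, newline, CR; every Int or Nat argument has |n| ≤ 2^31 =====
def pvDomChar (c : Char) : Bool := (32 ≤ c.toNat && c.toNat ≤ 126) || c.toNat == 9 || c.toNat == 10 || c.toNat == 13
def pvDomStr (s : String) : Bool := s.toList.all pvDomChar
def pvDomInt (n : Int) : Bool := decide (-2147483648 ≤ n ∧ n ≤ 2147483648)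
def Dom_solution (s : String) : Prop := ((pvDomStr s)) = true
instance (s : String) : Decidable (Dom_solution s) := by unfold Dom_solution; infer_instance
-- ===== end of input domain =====

-- B replaces the split-into-words + per-word capitalize + join pipeline by a single character scan with an at-word-start flag (alternative decomposition, same cost).

-- ===== PORT A =====
def solution (s : String) : String :=
  let s_list := PySem.Chars.splitOn s.toList [' ']
  let d := s_list.foldl (fun d string =>
    if string.length ≠ 0 then
      match PySem.List.pyGet? string 0 with
      | some c =>
          d ++ [PySem.Chars.upperChar c :: PySem.Chars.lower (PySem.List.slice string (some 1) none)]
      | none => d   -- unreachable: string is nonempty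
    else
      d ++ [string]) []
  String.ofList (PySem.Chars.join [' '] d)

-- ===== PORT B =====
def solution_alt (s : String) : String :=
  let st := s.toList.foldl (fun (st : List Char × Bool) ch =>
    if ch = ' ' then (st.1 ++ [ch], true)
    else (st.1 ++ [if st.2 then PySem.Chars.upperChar ch else PySem.Chars.lowerChar ch], false))
    ([], true)
  String.ofList st.1

-- ===== PRECONDITION & SPEC =====
def Spec_solution (s : String) (out : String) : Prop := out = solution_alt s
instance (s : String) (out : String) : Decidable (Spec_solution s out) := by unfold Spec_solution; infer_instance

-- ===== CLAIM (what is proved, stated in full; the proofs are below) =====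
def Claim_equal_solution : Prop := ∀ (s : String), Dom_solution s → Spec_solution s (solution s)

-- ===== LEMMAS AND PROOFS =====

/-- Python's `s.split(" ")` for a single-char separator, structurally. -/
def split1 : List Char → List (List Char)
  | [] => [[]]
  | c :: rest =>
      if c = ' ' then [] :: split1 rest
      else match split1 rest with
        | [] => [[c]]          -- unreachable: split1 is never empty
        | p :: ps => (c :: p) :: ps

/-- prepend `pre` to the first piece -/
def addCur (pre : List Char) : List (List Char) → List (List Char)
  | [] => [pre]
  | p :: ps => (pre ++ p) :: ps

theorem split1_ne_nil (l : List Char) : split1 l ≠ [] := by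
  cases l with
  | nil => simp [split1]
  | cons c rest =>
      simp only [split1]
      split
      · simp
      · split <;> simp

theorem addCur_nil (xs : List (List Char)) (h : xs ≠ []) : addCur [] xs = xs := by
  cases xs with
  | nil => exact absurd rfl h
  | cons p ps => simp [addCur]

theorem go_eq_split1 (l : List Char) : ∀ fuel, l.length ≤ fuel → ∀ cur acc,
    PySem.Chars.splitOn.go [' '] fuel l cur acc = acc.reverse ++ addCur cur.reverse (split1 l) := by
  induction l with
  | nil =>
      intro fuel _ cur acc
      cases fuel <;> simp [PySem.Chars.splitOn.go, split1, addCur]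
  | cons c rest ih =>
      intro fuel hf cur acc
      cases fuel with
      | zero => simp at hf
      | succ fuel' =>
        by_cases hc : c = ' '
        · subst hc
          have hpre : [' '].isPrefixOf (' ' :: rest) = true := by simp [List.isPrefixOf]
          simp only [PySem.Chars.splitOn.go, hpre, if_pos, List.length_cons, List.drop_succ_cons,
            List.length_nil, List.drop_zero]
          rw [ih fuel' (by simpa using hf) [] (cur.reverse :: acc)]
          have h1 := split1_ne_nil rest
          simp [split1, addCur]
          cases h2 : split1 rest with
          | nil => exact absurd h2 h1
          | cons p ps => simp
        · have hpre : [' '].isPrefixOf (c :: rest) = false := by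
            simp only [List.isPrefixOf, Bool.and_eq_false_iff]
            left
            simp [beq_eq_false_iff_ne]
            exact fun (h : ' ' = c) => hc h.symm
          simp only [PySem.Chars.splitOn.go, hpre, Bool.false_eq_true, if_false]
          rw [ih fuel' (by simpa using hf) (c :: cur) acc]
          have h1 := split1_ne_nil rest
          cases h2 : split1 rest with
          | nil => exact absurd h2 h1
          | cons p ps => simp [split1, hc, h2, addCur]

theorem splitOn_eq_split1 (l : List Char) : PySem.Chars.splitOn l [' '] = split1 l := by
  unfold PySem.Chars.splitOn
  rw [go_eq_split1 l (l.length + 1) (by omega) [] []]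
  simpa using addCur_nil _ (split1_ne_nil l)

/-- the per-word transform of A -/
def capWord : List Char → List Char
  | [] => []
  | c :: cs => PySem.Chars.upperChar c :: PySem.Chars.lower cs

theorem foldA_eq_map (xs : List (List Char)) : ∀ d : List (List Char),
    xs.foldl (fun d string =>
      if string.length ≠ 0 then
        match PySem.List.pyGet? string 0 with
        | some c =>
            d ++ [PySem.Chars.upperChar c :: PySem.Chars.lower (PySem.List.slice string (some 1) none)]
        | none => d
      else d ++ [string]) d = d ++ xs.map capWord := by
  have hstep : ∀ (d : List (List Char)) (x : List Char),
      (if x.length ≠ 0 then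
        match PySem.List.pyGet? x 0 with
        | some c =>
            d ++ [PySem.Chars.upperChar c :: PySem.Chars.lower (PySem.List.slice x (some 1) none)]
        | none => d
      else d ++ [x]) = d ++ [capWord x] := by
    intro d x
    cases x with
    | nil => simp [capWord]
    | cons c cs =>
        simp [capWord, PySem.List.pyGet?, PySem.List.pyIdx?, PySem.List.slice_from]
  induction xs with
  | nil => simp
  | cons x xs ih =>
      intro d
      rw [List.foldl_cons, hstep d x, ih]
      simp

/-- B's scan, structurally: `flag` = at word start -/
def bgo : Bool → List Char → List Char
  | _, [] => []
  | flag, c :: cs =>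
      if c = ' ' then ' ' :: bgo true cs
      else (if flag then PySem.Chars.upperChar c else PySem.Chars.lowerChar c) :: bgo false cs

theorem foldB_eq_bgo (l : List Char) : ∀ out flag,
    (l.foldl (fun (st : List Char × Bool) ch =>
      if ch = ' ' then (st.1 ++ [ch], true)
      else (st.1 ++ [if st.2 then PySem.Chars.upperChar ch else PySem.Chars.lowerChar ch], false))
      (out, flag)).1 = out ++ bgo flag l := by
  induction l with
  | nil => simp [bgo]
  | cons c cs ih =>
      intro out flag
      by_cases hc : c = ' '
      · subst hc; simp [bgo, ih]
      · simp [bgo, hc, ih]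

/-- core: join of capitalized words = B's scan (both flag states at once) -/
theorem join_map_split1 (l : List Char) :
    PySem.Chars.join [' '] ((split1 l).map capWord) = bgo true l ∧
    (∀ p ps, split1 l = p :: ps →
      PySem.Chars.join [' '] (PySem.Chars.lower p :: ps.map capWord) = bgo false l) := by
  induction l with
  | nil =>
      constructor
      · simp [split1, capWord, bgo, PySem.Chars.join]
        decide
      · intro p ps h
        simp [split1] at h
        obtain ⟨hp, hps⟩ := h
        subst hp; subst hps
        simp [PySem.Chars.join, PySem.Chars.lower, bgo]
        decide
  | cons c cs ih =>
      obtain ⟨ih1, ih2⟩ := ih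
      by_cases hc : c = ' '
      · subst hc
        have hsplit : split1 (' ' :: cs) = [] :: split1 cs := by simp [split1]
        have hne := split1_ne_nil cs
        have key : PySem.Chars.join [' '] ([] :: (split1 cs).map capWord) = ' ' :: bgo true cs := by
          cases h2 : split1 cs with
          | nil => exact absurd h2 hne
          | cons q qs =>
              rw [← ih1, h2]
              simp [PySem.Chars.join, List.intercalate]
        constructor
        · rw [hsplit]; simp only [List.map_cons, capWord]; exact key
        · intro p ps h
          rw [hsplit] at h
          injection h with h1 h2
          subst h1; subst h2
          have : PySem.Chars.lower [] = ([] : List Char) := by simp [PySem.Chars.lower]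
          rw [this]
          simpa [bgo] using key
      · cases h2 : split1 cs with
        | nil => exact absurd h2 (split1_ne_nil cs)
        | cons p ps =>
            have hsplit : split1 (c :: cs) = (c :: p) :: ps := by simp [split1, hc, h2]
            have hb : PySem.Chars.join [' '] (PySem.Chars.lower p :: ps.map capWord) = bgo false cs :=
              ih2 p ps h2
            constructor
            · rw [hsplit]
              simp only [List.map_cons, capWord]
              have : PySem.Chars.join [' '] ((PySem.Chars.upperChar c :: PySem.Chars.lower p) :: ps.map capWord)
                  = PySem.Chars.upperChar c :: PySem.Chars.join [' '] (PySem.Chars.lower p :: ps.map capWord) := by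
                cases ps <;> simp [PySem.Chars.join, List.intercalate]
              rw [this, hb]
              simp [bgo, hc]
            · intro q qs h
              rw [hsplit] at h
              injection h with h1 h2'
              subst h1; subst h2'
              have hlow : PySem.Chars.lower (c :: p) = PySem.Chars.lowerChar c :: PySem.Chars.lower p := by
                simp [PySem.Chars.lower]
              rw [hlow]
              have : PySem.Chars.join [' '] ((PySem.Chars.lowerChar c :: PySem.Chars.lower p) :: ps.map capWord)
                  = PySem.Chars.lowerChar c :: PySem.Chars.join [' '] (PySem.Chars.lower p :: ps.map capWord) := by
                cases ps <;> simp [PySem.Chars.join, List.intercalate]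
              rw [this, hb]
              simp [bgo, hc]

-- ===== VERDICT (by name: the statement is the Claim_ definition above) =====
theorem solution_spec : Claim_equal_solution := by
  intro s _
  unfold Spec_solution solution solution_alt
  simp only [splitOn_eq_split1, foldA_eq_map, List.nil_append, foldB_eq_bgo]
  rw [(join_map_split1 s.toList).1]
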